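-- pv_equiv track=rewrite | github.com/anpicci/topcoffea | topcoffea/modules/hist_utils.py | get_common_keys
-- ===== SOURCE A (Python) =====
-- from typing import Any, Callable, Dict, Iterable, List, Mapping, Tuple
--
-- def get_common_keys(dict1: Mapping, dict2: Mapping):
--     common_lst: List = []
--     unique_1_lst: List = []
--     unique_2_lst: List = []
--
--     for k1 in dict1.keys():
--         if k1 in dict2.keys():
--             common_lst.append(k1)
--         else:
--             unique_1_lst.append(k1)
--
--     for k2 in dict2.keys():
--         if k2 not in common_lst:
--             unique_2_lst.append(k2)
--
--     return [common_lst, unique_1_lst, unique_2_lst]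
-- ===== SOURCE B (Python) =====
-- def get_common_keys(dict1, dict2):
--     # Tag each key with which dict(s) it occurs in: bit 1 = dict1, bit 2 = dict2.
--     tag = {}
--     for k in dict1:
--         tag[k] = 1
--     for k in dict2:
--         tag[k] = tag.get(k, 0) | 2
--     common_lst, unique_1_lst, unique_2_lst = [], [], []
--     for k, t in tag.items():
--         if t == 3:
--             common_lst.append(k)
--         elif t == 1:
--             unique_1_lst.append(k)
--         else:
--             unique_2_lst.append(k)
--     return [common_lst, unique_1_lst, unique_2_lst]
-- ===== Notes on version B (the rewrite author's own statement) =====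
-- stated objective: faster
-- what changed: A's two interdependent membership-testing loops (unique_2 scanned against the built common list) are replaced by a bitmask-tagging dict merged from both inputs (bit 1 = in dict1, bit 2 = in dict2) followed by one dispatch pass over the tag dict's items; B performs no membership test at all. Pre_ requires distinct keys in each association list, since a Python dict cannot hold duplicate keys.
import Mathlib
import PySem

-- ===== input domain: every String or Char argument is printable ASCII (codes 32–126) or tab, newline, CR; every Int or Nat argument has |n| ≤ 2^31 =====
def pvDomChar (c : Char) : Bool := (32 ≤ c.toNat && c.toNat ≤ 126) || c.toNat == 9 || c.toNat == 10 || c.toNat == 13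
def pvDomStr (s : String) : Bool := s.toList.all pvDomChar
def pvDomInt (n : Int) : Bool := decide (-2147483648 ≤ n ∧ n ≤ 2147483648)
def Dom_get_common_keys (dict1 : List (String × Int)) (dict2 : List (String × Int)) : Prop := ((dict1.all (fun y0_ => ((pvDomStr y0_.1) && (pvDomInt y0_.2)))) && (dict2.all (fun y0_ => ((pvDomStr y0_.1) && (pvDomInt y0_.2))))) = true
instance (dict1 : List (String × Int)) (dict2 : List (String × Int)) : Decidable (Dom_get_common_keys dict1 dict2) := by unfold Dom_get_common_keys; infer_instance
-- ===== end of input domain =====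

-- B replaces A's two interdependent membership-scanning loops by a bitmask-tagging dict
-- merged from both inputs plus one dispatch pass over its items (objective: faster).

-- ===== PORT A =====
-- Two loops with append accumulators; unique_2 is filtered against the built common list.
def get_common_keys (dict1 : List (String × Int)) (dict2 : List (String × Int)) : List (List String) :=
  let keys2 : List String := dict2.map Prod.fst
  let cu : List String × List String :=
    (dict1.map Prod.fst).foldl (fun acc k1 =>
      if keys2.contains k1 then (acc.1 ++ [k1], acc.2) else (acc.1, acc.2 ++ [k1]))
      ([], [])
  let common_lst := cu.1
  let unique_1_lst := cu.2
  let unique_2_lst : List String :=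
    keys2.foldl (fun acc k2 => if !(common_lst.contains k2) then acc ++ [k2] else acc) []
  [common_lst, unique_1_lst, unique_2_lst]

-- ===== PORT B =====
-- tag[k] = 1 for dict1 keys, then tag[k] = tag.get(k,0) | 2 over dict2; one dispatch pass.
def get_common_keys_alt (dict1 : List (String × Int)) (dict2 : List (String × Int)) : List (List String) :=
  let tag1 : PySem.Dict String Int :=
    dict1.foldl (fun d p => d.insert p.1 1) PySem.Dict.empty
  let tag : PySem.Dict String Int :=
    dict2.foldl (fun d p => d.insert p.1 (PySem.Int.bor (d.getD p.1 0) 2)) tag1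
  let out : List String × List String × List String :=
    tag.items.foldl (fun acc kt =>
      if kt.2 == 3 then (acc.1 ++ [kt.1], acc.2.1, acc.2.2)
      else if kt.2 == 1 then (acc.1, acc.2.1 ++ [kt.1], acc.2.2)
      else (acc.1, acc.2.1, acc.2.2 ++ [kt.1])) ([], [], [])
  [out.1, out.2.1, out.2.2]

-- ===== PRECONDITION & SPEC =====
-- Pre_ requires distinct keys in each association list: a Python dict (A's Mapping input)
-- cannot hold duplicate keys, so a duplicate-key list does not represent an input of A.
def Pre_get_common_keys (dict1 : List (String × Int)) (dict2 : List (String × Int)) : Prop :=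
  (dict1.map Prod.fst).Nodup ∧ (dict2.map Prod.fst).Nodup
instance (dict1 : List (String × Int)) (dict2 : List (String × Int)) : Decidable (Pre_get_common_keys dict1 dict2) := by unfold Pre_get_common_keys; infer_instance
def pvWitness_get_common_keys : (List (String × Int)) × (List (String × Int)) :=
  ([("a", 1), ("b", 2)], [("b", 5), ("c", 7)])
def Spec_get_common_keys (dict1 : List (String × Int)) (dict2 : List (String × Int)) (out : List (List String)) : Prop := out = get_common_keys_alt dict1 dict2
instance (dict1 : List (String × Int)) (dict2 : List (String × Int)) (out : List (List String)) : Decidable (Spec_get_common_keys dict1 dict2 out) := by unfold Spec_get_common_keys; infer_instance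

-- ===== CLAIM (what is proved, stated in full; the proofs are below) =====
def Claim_equal_get_common_keys : Prop := ∀ (dict1 : List (String × Int)) (dict2 : List (String × Int)), Dom_get_common_keys dict1 dict2 → Pre_get_common_keys dict1 dict2 → Spec_get_common_keys dict1 dict2 (get_common_keys dict1 dict2)

-- ===== LEMMAS AND PROOFS =====

-- A's pair-accumulator loop splits into two independent filters.
theorem pair_foldl_split (keys2 : List String) (l : List String) (a b : List String) :
    l.foldl (fun (acc : List String × List String) k1 =>
      if keys2.contains k1 then (acc.1 ++ [k1], acc.2) else (acc.1, acc.2 ++ [k1])) (a, b)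
    = (a ++ l.filter (fun k => keys2.contains k),
       b ++ l.filter (fun k => !keys2.contains k)) := by
  induction l generalizing a b with
  | nil => simp
  | cons x xs ih =>
    simp only [List.foldl_cons]
    by_cases h : keys2.contains x = true
    · rw [if_pos h, ih]
      have h' : x ∈ keys2 := by simpa using h
      simp [h']
    · rw [if_neg h, ih]
      have h' : x ∉ keys2 := by simpa using h
      simp [h']

-- B's dispatch loop over items splits into three independent filters (keys extracted).
theorem triple_foldl_split (l : List (String × Int)) (a b c : List String) :
    l.foldl (fun (acc : List String × List String × List String) kt =>
      if kt.2 == 3 then (acc.1 ++ [kt.1], acc.2.1, acc.2.2)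
      else if kt.2 == 1 then (acc.1, acc.2.1 ++ [kt.1], acc.2.2)
      else (acc.1, acc.2.1, acc.2.2 ++ [kt.1])) (a, b, c)
    = (a ++ (l.filter (fun kt => kt.2 == 3)).map Prod.fst,
       b ++ (l.filter (fun kt => kt.2 == 1)).map Prod.fst,
       c ++ (l.filter (fun kt => !(kt.2 == 3) && !(kt.2 == 1))).map Prod.fst) := by
  induction l generalizing a b c with
  | nil => simp
  | cons x xs ih =>
    simp only [List.foldl_cons]
    by_cases h3 : x.2 == 3
    · rw [if_pos h3, ih]
      have h1 : x.2 ≠ 1 := by simp at h3; omega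
      simp [h3, h1]
    · rw [if_neg (by simp_all)]
      by_cases h1 : x.2 == 1
      · rw [if_pos h1, ih]; simp [h3, h1]
      · rw [if_neg (by simp_all), ih]; simp [h3, h1]

-- tag1 after the first loop: items are dict1's keys each tagged 1.
theorem tag1_items (dict1 : List (String × Int)) (h : (dict1.map Prod.fst).Nodup) :
    (dict1.foldl (fun d p => d.insert p.1 (1 : Int)) PySem.Dict.empty).items
    = (dict1.map Prod.fst).map (fun k => (k, (1 : Int))) := by
  have := PySem.Dict.items_foldl_insert_fresh (d := (PySem.Dict.empty : PySem.Dict String Int))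
    (l := dict1) (k := Prod.fst) (v := fun _ => (1 : Int))
    (by intro a _; simp [PySem.Dict.contains_empty]) h
  simpa [List.map_map] using this

-- The second loop: keys already in d get their value |2 in place, fresh keys append with tag 2.
theorem tag2_items (l : List (String × Int)) (d : PySem.Dict String Int)
    (hd : d.keys.Nodup) (hl : (l.map Prod.fst).Nodup) :
    (l.foldl (fun d p => d.insert p.1 (PySem.Int.bor (d.getD p.1 0) 2)) d).items
    = d.items.map (fun q => if (l.map Prod.fst).contains q.1 then (q.1, PySem.Int.bor q.2 2) else q)
      ++ ((l.map Prod.fst).filter (fun k => !(d.contains k))).map (fun k => (k, (2 : Int))) := by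
  induction l generalizing d with
  | nil => simp
  | cons p rest ih =>
    simp only [List.foldl_cons, List.map_cons] at *
    obtain ⟨hp, hrest⟩ := List.nodup_cons.mp hl
    have hp2 : ¬ ∃ v, (p.1, v) ∈ rest := by
      rintro ⟨v, hv⟩
      exact hp (List.mem_map.mpr ⟨(p.1, v), hv, rfl⟩)
    have hnd' : (d.insert p.1 (PySem.Int.bor (d.getD p.1 0) 2)).keys.Nodup :=
      PySem.Dict.nodup_keys_insert _ _ _ hd
    by_cases hc : d.contains p.1 = true
    · -- p.1 already a key of d: value becomes old | 2, position kept
      have hitems := PySem.Dict.items_insert_of_contains (d := d)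
        (k := p.1) (v := PySem.Int.bor (d.getD p.1 0) 2) hc
      rw [ih _ hnd' hrest]
      congr 1
      · rw [hitems, List.map_map]
        apply List.map_congr_left
        intro q hq
        simp only [Function.comp]
        by_cases hq1 : q.1 = p.1
        · have hval : d.getD p.1 0 = q.2 := by
            have hmem : (p.1, q.2) ∈ d.items := by
              have hqe : q = (q.1, q.2) := rfl
              rw [hq1] at hqe; rw [hqe] at hq; exact hq
            exact PySem.Dict.getD_of_mem_items d hmem hd 0
          simp [hq1, ← hval, hp2, List.contains_eq_mem]
        · have hinner : (if (q.1 == p.1) = true then (p.1, PySem.Int.bor (d.getD p.1 0) 2) else q) = q :=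
            if_neg (by simpa using hq1)
          rw [hinner]
          have hcc : (p.1 :: rest.map Prod.fst).contains q.1 = (rest.map Prod.fst).contains q.1 := by
            have : (q.1 == p.1) = false := by simpa using hq1
            simp [this]
          simp only [hcc]
      · -- filter parts agree: insert changes no contains, and p.1 is dropped on both sides
        have hfilter : (rest.map Prod.fst).filter
              (fun k => !((d.insert p.1 (PySem.Int.bor (d.getD p.1 0) 2)).contains k))
            = (rest.map Prod.fst).filter (fun k => !(d.contains k)) := by
          apply List.filter_congr
          intro k hk
          have hkp : (k == p.1) = false := by
            have : k ≠ p.1 := by rintro rfl; exact hp hk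
            simpa using this
          rw [PySem.Dict.contains_insert, hkp]
          simp
        rw [hfilter, List.filter_cons, if_neg (by simp [hc])]
    · -- p.1 fresh: appended with value 0 | 2 = 2
      have hcf : d.contains p.1 = false := by simpa using hc
      have hget : d.getD p.1 0 = 0 := PySem.Dict.getD_of_not_contains d 0 hcf
      have h02 : PySem.Int.bor (0 : Int) 2 = 2 := by decide
      simp only [hget, h02]
      rw [ih _ (by simpa only [hget, h02] using hnd') hrest]
      rw [PySem.Dict.items_insert_of_not_contains d 2 hcf, List.map_append]
      have hsing : [((p.1 : String), (2 : Int))].map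
          (fun q => if (rest.map Prod.fst).contains q.1 then (q.1, PySem.Int.bor q.2 2) else q)
          = [(p.1, (2 : Int))] := by
        simp only [List.map_cons, List.map_nil]
        rw [if_neg (by simpa [List.contains_eq_mem] using hp)]
      rw [hsing]
      have hfilter : (rest.map Prod.fst).filter (fun k => !((d.insert p.1 2).contains k))
          = (rest.map Prod.fst).filter (fun k => !(d.contains k)) := by
        apply List.filter_congr
        intro k hk
        have hkp : (k == p.1) = false := by
          have : k ≠ p.1 := by rintro rfl; exact hp hk
          simpa using this
        rw [PySem.Dict.contains_insert, hkp]
        simp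
      rw [hfilter]
      have hfc : (p.1 :: rest.map Prod.fst).filter (fun k => !(d.contains k))
          = p.1 :: (rest.map Prod.fst).filter (fun k => !(d.contains k)) := by
        simp [hcf]
      simp only [hfc, List.map_cons]
      rw [List.append_assoc]
      congr 1
      apply List.map_congr_left
      intro q hq
      have hq1 : q.1 ≠ p.1 := by
        intro h
        have hmemk : q.1 ∈ d.keys := PySem.Dict.mem_keys_of_mem_items d hq
        rw [h] at hmemk
        exact absurd ((PySem.Dict.contains_iff_mem_keys _ _).mpr hmemk) (by simp [hcf])
      by_cases hr : q.1 ∈ rest.map Prod.fst <;>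
        simp [hq1, hr, List.contains_eq_mem]

-- pointwise: tagging dict1's segment yields (k,3) on shared keys and (k,1) otherwise
theorem seg_glue (keys2 keys1 : List String) :
    (keys1.map (fun k => (k, (1 : Int)))).map
        (fun q => if keys2.contains q.1 then (q.1, PySem.Int.bor q.2 2) else q)
    = keys1.map (fun k => if keys2.contains k then (k, (3 : Int)) else (k, 1)) := by
  rw [List.map_map]
  apply List.map_congr_left
  intro k _
  simp only [Function.comp]
  by_cases h : keys2.contains k
  · rw [if_pos h, if_pos h]
    have : PySem.Int.bor (1 : Int) 2 = 3 := by decide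
    rw [this]
  · rw [if_neg h, if_neg h]

-- the merged segments, classified: the dict1 segment with tag 3 is the common list
theorem seg_common (keys2 keys1 : List String) :
    (((keys1.map (fun k => if keys2.contains k then (k, (3 : Int)) else (k, 1))).filter
        (fun q => q.2 == 3)).map Prod.fst)
    = keys1.filter (fun k => keys2.contains k) := by
  induction keys1 with
  | nil => simp
  | cons k ks ih =>
    simp only [List.map_cons, List.filter_cons]
    by_cases h : keys2.contains k
    · have h' : k ∈ keys2 := by simpa using h
      simp only [if_pos h]
      simpa [List.filter_cons, h, h'] using ih
    · have h' : k ∉ keys2 := by simpa using h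
      simp only [if_neg h]
      simpa [List.filter_cons, h, h'] using ih

-- the dict1 segment with tag 1 is the unique_1 list
theorem seg_unique1 (keys2 keys1 : List String) :
    (((keys1.map (fun k => if keys2.contains k then (k, (3 : Int)) else (k, 1))).filter
        (fun q => q.2 == 1)).map Prod.fst)
    = keys1.filter (fun k => !keys2.contains k) := by
  induction keys1 with
  | nil => simp
  | cons k ks ih =>
    simp only [List.map_cons, List.filter_cons]
    by_cases h : keys2.contains k
    · have h' : k ∈ keys2 := by simpa using h
      simp only [if_pos h]
      simpa [List.filter_cons, h, h'] using ih
    · have h' : k ∉ keys2 := by simpa using h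
      simp only [if_neg h]
      simpa [List.filter_cons, h, h'] using ih

-- the dict1 segment contributes nothing to the else bucket
theorem seg_else_left (keys2 keys1 : List String) :
    ((keys1.map (fun k => if keys2.contains k then (k, (3 : Int)) else (k, 1))).filter
        (fun q => !(q.2 == 3) && !(q.2 == 1)))
    = [] := by
  induction keys1 with
  | nil => simp
  | cons k ks ih =>
    simp only [List.map_cons, List.filter_cons]
    by_cases h : keys2.contains k
    · simp only [if_pos h]
      simpa [List.filter_cons] using ih
    · simp only [if_neg h]
      simpa [List.filter_cons] using ih

-- the appended tag-2 segment passes the else bucket unchanged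
theorem seg_else_right (l : List String) :
    (((l.map (fun k => (k, (2 : Int)))).filter
        (fun q => !(q.2 == 3) && !(q.2 == 1))).map Prod.fst) = l := by
  induction l with
  | nil => simp
  | cons k ks ih => simpa [List.filter_cons] using ih

-- A filters unique_2 against the built common list; that equals filtering against keys1
theorem unique2_eq (keys1 keys2 : List String) :
    keys2.filter (fun k => !((keys1.filter (fun j => keys2.contains j)).contains k))
    = keys2.filter (fun k => !keys1.contains k) := by
  apply List.filter_congr
  intro k hk
  simp [List.contains_eq_mem, List.mem_filter, hk]

-- ===== VERDICT (by name: the statement is the Claim_ definition above) =====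
theorem get_common_keys_spec : Claim_equal_get_common_keys := by
  intro dict1 dict2 _ hpre
  obtain ⟨h1, h2⟩ := hpre
  unfold Spec_get_common_keys get_common_keys get_common_keys_alt
  have htag1 := tag1_items dict1 h1
  have hkeys1 : (dict1.foldl (fun d p => d.insert p.1 (1 : Int)) PySem.Dict.empty).keys
      = dict1.map Prod.fst := by
    simp only [PySem.Dict.keys, htag1, List.map_map]
    simp
  have hnd1 : (dict1.foldl (fun d p => d.insert p.1 (1 : Int)) PySem.Dict.empty).keys.Nodup := by
    rw [hkeys1]; exact h1
  have hcont1 : ∀ k, (dict1.foldl (fun d p => d.insert p.1 (1 : Int)) PySem.Dict.empty).contains k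
      = (dict1.map Prod.fst).contains k := by
    intro k
    rw [PySem.Dict.contains_eq_decide_mem_keys, hkeys1, List.contains_eq_mem]
  have htag := tag2_items dict2 _ hnd1 h2
  rw [htag1] at htag
  have hfreshfilter : (dict2.map Prod.fst).filter
        (fun k => !((dict1.foldl (fun d p => d.insert p.1 (1 : Int)) PySem.Dict.empty).contains k))
      = (dict2.map Prod.fst).filter (fun k => !((dict1.map Prod.fst).contains k)) := by
    apply List.filter_congr
    intro k _
    rw [hcont1]
  rw [hfreshfilter] at htag
  simp only [pair_foldl_split, PySem.List.foldl_append_if_eq_filter, htag, triple_foldl_split,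
    List.filter_append, List.map_append, List.nil_append]
  rw [seg_glue, seg_common, seg_unique1, seg_else_left, seg_else_right, unique2_eq]
  simp
  refine ⟨?_, ?_⟩ <;> (intros; omega)
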